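-- pv_equiv track=rewrite | github.com/mranthony89/analizzatorephp | analizzatore_php_light.py | _is_in_html_block
-- ===== SOURCE A (Python) =====
-- from typing import List, Dict, Tuple, Optional, Any, Callable
--
-- def _is_in_html_block(lines: List[str], line_num: int) -> bool:
--     """Verifica se una linea è all'interno di un blocco HTML (dopo ?>)"""
--     in_php = True
--     for i in range(line_num):
--         if '<?php' in lines[i] or '<?' in lines[i]:
--             in_php = True
--         elif '?>' in lines[i]:
--             in_php = False
--     return not in_php
-- ===== SOURCE B (Python) =====
-- def _is_in_html_block(lines, line_num):
--     """Verifica se una linea è all'interno di un blocco HTML (dopo ?>)"""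
--     # Scan backward: only the last toggling line before line_num matters.
--     for i in range(line_num - 1, -1, -1):
--         if '<?' in lines[i]:
--             return False
--         if '?>' in lines[i]:
--             return True
--     return False
-- ===== Notes on version B (the rewrite author's own statement) =====
-- stated objective: simpler
-- what changed: Replaced the full forward pass maintaining an in_php flag by a backward scan that returns at the first toggling line (the last toggle alone decides), dropping the flag and the redundant '<?php' test.
import Mathlib
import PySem

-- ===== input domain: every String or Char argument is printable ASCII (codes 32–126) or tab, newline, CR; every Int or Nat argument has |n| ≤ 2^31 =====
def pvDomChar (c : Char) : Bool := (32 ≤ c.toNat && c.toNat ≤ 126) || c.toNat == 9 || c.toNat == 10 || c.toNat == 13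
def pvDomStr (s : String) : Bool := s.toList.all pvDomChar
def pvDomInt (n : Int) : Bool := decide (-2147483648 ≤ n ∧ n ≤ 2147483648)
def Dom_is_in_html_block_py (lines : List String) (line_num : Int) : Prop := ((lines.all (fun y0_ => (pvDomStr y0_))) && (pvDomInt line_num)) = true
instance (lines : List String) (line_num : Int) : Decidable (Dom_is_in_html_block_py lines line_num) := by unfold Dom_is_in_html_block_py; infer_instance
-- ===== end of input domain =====

-- B replaces A's forward pass with a maintained flag by a backward scan returning at the last toggling line (simpler, early exit).


-- ===== PORT A =====
-- forward loop over range(line_num); Pre_ guarantees every index is in range, so pyGetD is exact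
def is_in_html_block_py (lines : List String) (line_num : Int) : Bool :=
  let in_php := (PySem.List.pyRange 0 line_num 1).foldl (fun st i =>
    let s := PySem.List.pyGetD lines i ""
    if PySem.Str.isIn "<?php" s || PySem.Str.isIn "<?" s then true
    else if PySem.Str.isIn "?>" s then false
    else st) true
  !in_php

-- ===== PORT B =====
-- backward scan from line_num-1 down to 0; n is the number of lines still to inspect (index n-1 first)
def is_in_html_block_py_altGo (lines : List String) : Nat → Bool
  | 0 => false
  | n+1 =>
    let s := PySem.List.pyGetD lines (n : Int) ""
    if PySem.Str.isIn "<?" s then false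
    else if PySem.Str.isIn "?>" s then true
    else is_in_html_block_py_altGo lines n

def is_in_html_block_py_alt (lines : List String) (line_num : Int) : Bool :=
  is_in_html_block_py_altGo lines line_num.toNat

-- ===== PRECONDITION & SPEC =====
-- A (and B) raise IndexError when line_num exceeds len(lines); exactly those inputs are excluded.
def Pre_is_in_html_block_py (lines : List String) (line_num : Int) : Prop :=
  line_num ≤ lines.length
instance (lines : List String) (line_num : Int) : Decidable (Pre_is_in_html_block_py lines line_num) := by unfold Pre_is_in_html_block_py; infer_instance

def pvWitness_is_in_html_block_py : List String × Int := (["<html>", "<?php", "?>", "echo"], 3)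

def Spec_is_in_html_block_py (lines : List String) (line_num : Int) (out : Bool) : Prop := out = is_in_html_block_py_alt lines line_num
instance (lines : List String) (line_num : Int) (out : Bool) : Decidable (Spec_is_in_html_block_py lines line_num out) := by unfold Spec_is_in_html_block_py; infer_instance

-- ===== CLAIM (what is proved, stated in full; the proofs are below) =====
def Claim_equal_is_in_html_block_py : Prop := ∀ (lines : List String) (line_num : Int), Dom_is_in_html_block_py lines line_num → Pre_is_in_html_block_py lines line_num → Spec_is_in_html_block_py lines line_num (is_in_html_block_py lines line_num)

-- ===== LEMMAS AND PROOFS =====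

-- if "<?" is not a substring then neither is "<?php"
theorem php_not_isIn {s : String} (h : PySem.Str.isIn "<?" s = false) :
    PySem.Str.isIn "<?php" s = false := by
  rw [Bool.eq_false_iff] at h ⊢
  intro hphp
  apply h
  rw [PySem.Str.isIn_iff_infix] at hphp ⊢
  exact List.IsInfix.trans (l₂ := "<?php".toList) (by decide) hphp

-- A's fold over the first n indexes, negated, is B's backward scan
theorem fold_eq_altGo (lines : List String) (n : Nat) :
    (!(((List.range n).map (fun k : Nat => (k : Int))).foldl (fun st i =>
        let s := PySem.List.pyGetD lines i ""
        if PySem.Str.isIn "<?php" s || PySem.Str.isIn "<?" s then true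
        else if PySem.Str.isIn "?>" s then false
        else st) true))
      = is_in_html_block_py_altGo lines n := by
  induction n with
  | zero => simp [is_in_html_block_py_altGo]
  | succ n ih =>
    rw [List.range_succ, List.map_append, List.foldl_append]
    simp only [List.map_cons, List.map_nil, List.foldl_cons, List.foldl_nil,
      is_in_html_block_py_altGo]
    cases hlt : PySem.Str.isIn "<?" (PySem.List.pyGetD lines (n : Int) "") with
    | true => simp only [Bool.or_true, if_true, Bool.not_true]
    | false =>
      cases hgt : PySem.Str.isIn "?>" (PySem.List.pyGetD lines (n : Int) "") with
      | true =>
        simp only [php_not_isIn hlt, Bool.or_false]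
        simp
      | false =>
        simp only [php_not_isIn hlt, Bool.or_false]
        simp only [if_false, Bool.false_eq_true]
        exact ih

-- ===== VERDICT (by name: the statement is the Claim_ definition above) =====
theorem is_in_html_block_py_spec : Claim_equal_is_in_html_block_py := by
  intro lines line_num _ _
  unfold Spec_is_in_html_block_py is_in_html_block_py is_in_html_block_py_alt
  rw [PySem.List.pyRange_one]
  have : (List.range (line_num - 0).toNat).map (fun k : Nat => (0 : Int) + k)
      = (List.range line_num.toNat).map (fun k : Nat => (k : Int)) := by
    simp
  rw [this]
  exact fold_eq_altGo lines line_num.toNat
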